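-- pv_equiv track=rewrite | github.com/ywb-python/Python_excerise | python_300_examples/example_10.py | twin_string
-- ===== SOURCE A (Python) =====
-- def twin_string(str1: str, str2: str) -> str:
--     """
--     给定两个字符串s和t，每次可以任意交换s的奇数位或偶数位上的字符，即奇数位上的字符能
--     与其他奇数位的字符互换，偶数位上的字符也能与其他偶数位的字符互换，问能否经过若干
--     次交换，使s变成t
--     :param str1:字符串s
--     :param str2:字符串t
--     :return:s变成t返回Yes,不能返回No
--     """
--     str1_odd_list = sorted([el for index, el in enumerate(str1)
--                             if index % 2 == 0])
--     str1_even_list = sorted([el for index, el in enumerate(str1)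
--                              if index % 2 == 1])
--     str2_odd_list = sorted([el for index, el in enumerate(str2)
--                             if index % 2 == 0])
--     str2_even_list = sorted([el for index, el in enumerate(str2)
--                              if index % 2 == 1])
--     if str1_odd_list == str2_odd_list and str1_even_list == str2_even_list:
--         return 'Yes'
--     return 'No'
-- ===== SOURCE B (Python) =====
-- def twin_string(str1: str, str2: str) -> str:
--     delta = {}
--     for i, ch in enumerate(str1):
--         k = (i % 2, ch)
--         delta[k] = delta.get(k, 0) + 1
--     for i, ch in enumerate(str2):
--         k = (i % 2, ch)
--         delta[k] = delta.get(k, 0) - 1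
--     if all(v == 0 for v in delta.values()):
--         return 'Yes'
--     return 'No'
-- ===== Notes on version B (the rewrite author's own statement) =====
-- stated objective: alternative
-- what changed: Replaces the four sorts and sorted-list comparisons with a single counting pass over a dict keyed by (position-parity, char): str1 counts up, str2 counts down, and the strings match iff every delta is zero.
import Mathlib
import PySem

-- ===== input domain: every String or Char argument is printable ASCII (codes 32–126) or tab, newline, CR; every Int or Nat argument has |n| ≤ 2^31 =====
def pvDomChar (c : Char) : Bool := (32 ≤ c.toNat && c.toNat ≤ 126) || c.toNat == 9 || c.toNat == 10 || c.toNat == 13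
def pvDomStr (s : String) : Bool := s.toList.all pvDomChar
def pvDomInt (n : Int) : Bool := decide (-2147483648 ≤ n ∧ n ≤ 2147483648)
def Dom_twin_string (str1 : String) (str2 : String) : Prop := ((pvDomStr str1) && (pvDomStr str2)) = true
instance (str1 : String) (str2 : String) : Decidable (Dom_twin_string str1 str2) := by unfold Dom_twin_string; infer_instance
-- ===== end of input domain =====

-- B replaces A's four sorts by one dict counting pass over (index-parity, char) pairs (an alternative algorithm; not measured faster).

-- ===== PORT A =====
-- [el for index, el in enumerate(s) if index % 2 == p], then sorted(...)
def pvParityList (s : String) (p : Int) : List Char :=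
  ((PySem.List.enumerate s.toList 0).filter (fun q => PySem.Int.mod q.1 2 == p)).map (·.2)

def twin_string (str1 : String) (str2 : String) : String :=
  let str1_odd_list := PySem.List.sorted (pvParityList str1 0) (fun x => x) false
  let str1_even_list := PySem.List.sorted (pvParityList str1 1) (fun x => x) false
  let str2_odd_list := PySem.List.sorted (pvParityList str2 0) (fun x => x) false
  let str2_even_list := PySem.List.sorted (pvParityList str2 1) (fun x => x) false
  if str1_odd_list = str2_odd_list ∧ str1_even_list = str2_even_list then "Yes" else "No"

-- ===== PORT B =====
-- the key (i % 2, ch) of Source B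
def pvKey (q : Int × Char) : Int × Char := (PySem.Int.mod q.1 2, q.2)

def twin_string_alt (str1 : String) (str2 : String) : String :=
  let d1 : PySem.Dict (Int × Char) Int :=
    (PySem.List.enumerate str1.toList 0).foldl
      (fun d q => d.modify (pvKey q) 0 (· + 1)) PySem.Dict.empty
  let d2 : PySem.Dict (Int × Char) Int :=
    (PySem.List.enumerate str2.toList 0).foldl
      (fun d q => d.modify (pvKey q) 0 (· - 1)) d1
  if d2.values.all (fun v => v == 0) then "Yes" else "No"

-- ===== PRECONDITION & SPEC =====
def Spec_twin_string (str1 : String) (str2 : String) (out : String) : Prop := out = twin_string_alt str1 str2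
instance (str1 : String) (str2 : String) (out : String) : Decidable (Spec_twin_string str1 str2 out) := by unfold Spec_twin_string; infer_instance

-- ===== CLAIM (what is proved, stated in full; the proofs are below) =====
def Claim_equal_twin_string : Prop := ∀ (str1 : String) (str2 : String), Dom_twin_string str1 str2 → Spec_twin_string str1 str2 (twin_string str1 str2)

-- ===== LEMMAS AND PROOFS =====

-- getD through the "-1" counting fold (the +1 twin is PySem.Dict.getD_foldl_modify_add_one)
theorem pv_getD_foldl_modify_sub_one (l : List (Int × Char)) (d : PySem.Dict (Int × Char) Int) (v : Int × Char) :
    (l.foldl (fun d x => d.modify x 0 (· - 1)) d).getD v 0 = d.getD v 0 - (l.count v : Int) := by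
  induction l generalizing d with
  | nil => simp
  | cons x t ih =>
    simp only [List.foldl_cons, ih, List.count_cons]
    by_cases h : v = x
    · subst h
      rw [PySem.Dict.getD_modify_self]
      simp
      ring
    · rw [PySem.Dict.getD_modify_of_ne _ _ _ h]
      simp [Ne.symm h]

-- counting a key (p, c) in the mapped pair list = counting c in A's parity-p sublist
theorem pv_count_key (l : List (Int × Char)) (p : Int) (c : Char) :
    (l.map pvKey).count (p, c) =
      ((l.filter (fun q => PySem.Int.mod q.1 2 == p)).map (·.2)).count c := by
  induction l with
  | nil => rfl
  | cons x t ih =>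
    simp only [List.map_cons, List.count_cons, List.filter_cons]
    by_cases hp : PySem.Int.mod x.1 2 = p
    · have hp' : x.1 % 2 = p := (PySem.Int.mod_eq_emod_of_pos (by norm_num : (0:Int) < 2)).symm.trans hp
      by_cases hc : x.2 = c
      · simp [pvKey, hp', hc, ih]
      · simp [pvKey, hp', hc, ih, Prod.ext_iff]
    · have hp' : ¬ x.1 % 2 = p := by
        intro h; exact hp ((PySem.Int.mod_eq_emod_of_pos (by norm_num : (0:Int) < 2)).trans h)
      simp [pvKey, hp', ih, Prod.ext_iff]

-- indices from enumerate _ 0 are nonnegative, so parity is 0 or 1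
theorem pv_parity_empty (s : String) (p : Int) (h0 : p ≠ 0) (h1 : p ≠ 1) :
    pvParityList s p = [] := by
  unfold pvParityList
  rw [List.map_eq_nil_iff, List.filter_eq_nil_iff]
  intro q hq
  rcases (PySem.List.mem_enumerate_iff _ _ _).1 hq with ⟨k, hk, rfl⟩
  have hnn : (0:Int) ≤ PySem.Int.mod (0 + (k:Int)) 2 := PySem.Int.mod_nonneg _ (by norm_num)
  have hlt : PySem.Int.mod (0 + (k:Int)) 2 < 2 := PySem.Int.mod_lt _ (by norm_num)
  simp only [beq_iff_eq]
  omega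

theorem pv_delta_zero_iff (str1 str2 : String) :
    ((((PySem.List.enumerate str2.toList 0).foldl (fun d q => d.modify (pvKey q) 0 (· - 1))
        ((PySem.List.enumerate str1.toList 0).foldl (fun d q => d.modify (pvKey q) 0 (· + 1))
          (PySem.Dict.empty : PySem.Dict (Int × Char) Int))).values.all (fun v => v == 0)) = true)
    ↔ (∀ (p : Int) (c : Char), (pvParityList str1 p).count c = (pvParityList str2 p).count c) := by
  set l1 := PySem.List.enumerate str1.toList 0 with hl1
  set l2 := PySem.List.enumerate str2.toList 0 with hl2
  set d1 := l1.foldl (fun d q => d.modify (pvKey q) 0 (· + 1)) (PySem.Dict.empty : PySem.Dict (Int × Char) Int) with hd1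
  set d2 := l2.foldl (fun d q => d.modify (pvKey q) 0 (· - 1)) d1 with hd2
  have hg1 : ∀ k, d1.getD k 0 = ((l1.map pvKey).count k : Int) := by
    intro k
    rw [hd1, ← List.foldl_map (f := pvKey) (g := fun d x => PySem.Dict.modify d x 0 (· + 1)),
        PySem.Dict.getD_foldl_modify_add_one]
    simp [PySem.Dict.getD_eq_get?_getD, PySem.Dict.get?_empty]
  have hg2 : ∀ k, d2.getD k 0 = ((l1.map pvKey).count k : Int) - ((l2.map pvKey).count k : Int) := by
    intro k
    rw [hd2, ← List.foldl_map (f := pvKey) (g := fun d x => PySem.Dict.modify d x 0 (· - 1)),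
        pv_getD_foldl_modify_sub_one, hg1]
  have hnodup : d2.keys.Nodup := by
    rw [hd2]
    exact PySem.Dict.nodup_keys_foldl_modify_key _ pvKey _ (fun _ _ => (· - 1)) _
      (by rw [hd1]
          exact PySem.Dict.nodup_keys_foldl_modify_key _ pvKey _ (fun _ _ => (· + 1)) _ List.nodup_nil)
  have hall : ((d2.values.all (fun v => v == 0)) = true) ↔ ∀ k, d2.getD k 0 = 0 := by
    rw [PySem.Dict.values_eq_map_keys d2 hnodup 0]
    simp only [List.all_eq_true, List.mem_map, beq_iff_eq]
    constructor
    · intro h k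
      by_cases hk : k ∈ d2.keys
      · exact h _ ⟨k, hk, rfl⟩
      · exact PySem.Dict.getD_of_get?_eq_none _ _ ((PySem.Dict.get?_eq_none_iff_not_mem_keys _ _).2 hk)
    · rintro h v ⟨k, _, rfl⟩; exact h k
  rw [hall]
  constructor
  · intro h p c
    have hk := h (p, c)
    rw [hg2, pv_count_key, pv_count_key] at hk
    show (((l1.filter (fun q => PySem.Int.mod q.1 2 == p)).map (·.2)).count c
        = ((l2.filter (fun q => PySem.Int.mod q.1 2 == p)).map (·.2)).count c)
    omega
  · intro h k
    obtain ⟨p, c⟩ := k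
    rw [hg2, pv_count_key, pv_count_key]
    have hpc := h p c
    unfold pvParityList at hpc
    rw [← hl1, ← hl2] at hpc
    omega

theorem pv_main (str1 str2 : String) : twin_string str1 str2 = twin_string_alt str1 str2 := by
  have hAiff : (PySem.List.sorted (pvParityList str1 0) (fun x => x) false
                  = PySem.List.sorted (pvParityList str2 0) (fun x => x) false
              ∧ PySem.List.sorted (pvParityList str1 1) (fun x => x) false
                  = PySem.List.sorted (pvParityList str2 1) (fun x => x) false)
      ↔ (∀ (p : Int) (c : Char), (pvParityList str1 p).count c = (pvParityList str2 p).count c) := by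
    rw [PySem.List.sorted_id_eq_sorted_id_iff_perm, PySem.List.sorted_id_eq_sorted_id_iff_perm,
        List.perm_iff_count, List.perm_iff_count]
    constructor
    · rintro ⟨h0, h1⟩ p c
      by_cases hp0 : p = 0
      · subst hp0; exact h0 c
      by_cases hp1 : p = 1
      · subst hp1; exact h1 c
      rw [pv_parity_empty str1 p hp0 hp1, pv_parity_empty str2 p hp0 hp1]
    · intro h; exact ⟨fun c => h 0 c, fun c => h 1 c⟩
  have hcond := hAiff.trans (pv_delta_zero_iff str1 str2).symm
  unfold twin_string twin_string_alt
  dsimp only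
  split_ifs with h1 h2 h2
  · rfl
  · exact absurd (hcond.1 h1) h2
  · exact absurd (hcond.2 h2) h1
  · rfl

-- ===== VERDICT (by name: the statement is the Claim_ definition above) =====
theorem twin_string_spec : Claim_equal_twin_string := fun str1 str2 _ => pv_main str1 str2
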